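-- pv_equiv track=rewrite | github.com/SINHOLEE/Algorithm | python/beckjun/6988 타일밟기.py | xy
-- ===== SOURCE A (Python) =====
-- def xy(N):
--     x = 1
--     y = 1
--     result = 1
--     while True:
--         if result == N:
--             break
--
--         result += 1
--         y += 1
--         if result == N:
--             break
--         check = False
--         count = 0
--         for i in range(y - 1):
--             x += 1
--             y -= 1
--             result += 1
--             count += 1
--             if result == N:
--                 check = True
--                 break
--         if check:
--             break
--         else:
--             for j in range(count):
--                 x -= 1
--                 y += 1
--
--     return x, y
-- ===== SOURCE B (Python) =====
-- import math
--
-- def xy(N):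
--     # closed form: diagonal d via triangular-number inverse, position k within it
--     d = (math.isqrt(8 * N - 7) + 1) // 2
--     k = N - d * (d - 1) // 2
--     return k, d - k + 1
-- ===== Notes on version B (the rewrite author's own statement) =====
-- stated objective: faster
-- what changed: Replaces A's step-by-step walk along antidiagonals with an O(1) closed form: the diagonal index is recovered by an integer-sqrt triangular-number inverse and the position within it by subtraction.
-- outside the precondition, e.g. on xy(0): A does not finish within the time limit, B raises ValueError
import Mathlib
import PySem

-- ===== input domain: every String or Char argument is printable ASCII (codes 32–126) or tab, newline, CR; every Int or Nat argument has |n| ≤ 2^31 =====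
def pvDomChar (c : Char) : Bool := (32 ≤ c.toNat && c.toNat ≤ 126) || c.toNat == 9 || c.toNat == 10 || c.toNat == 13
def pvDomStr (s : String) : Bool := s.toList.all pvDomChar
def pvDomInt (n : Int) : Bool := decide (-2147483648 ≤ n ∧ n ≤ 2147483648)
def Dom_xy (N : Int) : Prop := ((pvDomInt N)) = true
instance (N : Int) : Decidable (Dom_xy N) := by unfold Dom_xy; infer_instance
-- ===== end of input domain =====

-- B replaces A's step-by-step walk along the antidiagonals with a closed form
-- (integer-sqrt triangular-number inverse); equivalence is claimed for N ≥ 1 (Pre_xy).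

-- ===== PORT A =====
-- inner `for i in range(y-1)` loop of A, with its break: state (x, y, result);
-- returns (x, y, result, count, check) exactly as A leaves these variables.
def xyFor : Nat → Int → Int → Int → Int → Int × Int × Int × Int × Bool
  | 0, x, y, r, _ => (x, y, r, 0, false)
  | n + 1, x, y, r, N =>
    let x := x + 1
    let y := y - 1
    let r := r + 1
    if r = N then (x, y, r, 1, true)
    else
      let (x', y', r', c, ch) := xyFor n x y r N
      (x', y', r', c + 1, ch)

-- outer `while True` loop of A, fuel-bounded (the fuel only makes the recursion
-- structural; with fuel = N.toNat it is never exhausted when N ≥ 1).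
def xyLoop : Nat → Int → Int → Int → Int → Int × Int
  | 0, x, y, _, _ => (x, y)
  | f + 1, x, y, r, N =>
    if r = N then (x, y)
    else
      let r := r + 1
      let y := y + 1
      if r = N then (x, y)
      else
        let (x', y', r', c, ch) := xyFor (y - 1).toNat x y r N
        if ch then (x', y')
        else xyLoop f (x' - c) (y' + c) r' N

def xy (N : Int) : List Int :=
  let p := xyLoop N.toNat 1 1 1 N
  [p.1, p.2]

-- ===== PORT B =====
def xy_alt (N : Int) : List Int :=
  let d := PySem.Int.floordiv (Int.sqrt (8 * N - 7) + 1) 2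
  let k := N - PySem.Int.floordiv (d * (d - 1)) 2
  [k, d - k + 1]

-- ===== PRECONDITION & SPEC =====
-- Pre_ excludes N ≤ 0, on which A never returns (infinite loop) and B's math.isqrt raises ValueError.
def Pre_xy (N : Int) : Prop := 1 ≤ N
instance (N : Int) : Decidable (Pre_xy N) := by unfold Pre_xy; infer_instance
def pvWitness_xy : Int := 5

def Spec_xy (N : Int) (out : List Int) : Prop := out = xy_alt N
instance (N : Int) (out : List Int) : Decidable (Spec_xy N out) := by unfold Spec_xy; infer_instance

-- ===== CLAIM (what is proved, stated in full; the proofs are below) =====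
def Claim_equal_xy : Prop := ∀ (N : Int), Dom_xy N → Pre_xy N → Spec_xy N (xy N)

-- ===== LEMMAS AND PROOFS =====

-- Inner loop, break case: A hits result == N after N - r of the n iterations.
lemma xyFor_break (n : Nat) (x y r N : Int) (h1 : 0 < N - r) (h2 : N - r ≤ (n : Int)) :
    xyFor n x y r N = (x + (N - r), y - (N - r), N, N - r, true) := by
  induction n generalizing x y r with
  | zero => simp only [Nat.cast_zero] at h2; omega
  | succ m ih =>
    simp only [xyFor]
    by_cases hr : r + 1 = N
    · have h3 : N - r = 1 := by omega
      simp [hr, h3]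
    · rw [if_neg hr]
      rw [ih (x + 1) (y - 1) (r + 1) (by omega) (by push_cast at h2; omega)]
      simp only [Prod.mk.injEq]
      refine ⟨?_, ?_, ?_, ?_, ?_⟩ <;> first | trivial | omega

-- Inner loop, no-break case: all n iterations run, check stays False.
lemma xyFor_nobreak (n : Nat) (x y r N : Int) (h : (n : Int) < N - r ∨ N - r ≤ 0) :
    xyFor n x y r N = (x + n, y - n, r + n, (n : Int), false) := by
  induction n generalizing x y r with
  | zero => simp [xyFor]
  | succ m ih =>
    simp only [xyFor]
    have hr : ¬ (r + 1 = N) := by push_cast at h; omega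
    rw [if_neg hr, ih (x + 1) (y - 1) (r + 1) (by push_cast at h ⊢; omega)]
    simp only [Prod.mk.injEq]
    refine ⟨?_, ?_, ?_, ?_, ?_⟩ <;> first | trivial | (push_cast; ring)

-- Evaluation of B's closed form when N's diagonal d is known:
-- T(d-1) < N ≤ T(d), stated multiplicatively via 2m = d(d-1).
lemma alt_eval (N d m : Int) (hd : 1 ≤ d) (hm : 2 * m = d * (d - 1))
    (h1 : m < N) (h2 : 2 * N ≤ d * (d + 1)) :
    xy_alt N = [N - m, d - (N - m) + 1] := by
  have h8 : (0 : Int) ≤ 8 * N - 7 := by nlinarith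
  have hsq : Int.sqrt (8 * N - 7) = ((Nat.sqrt (8 * N - 7).toNat : ℕ) : Int) := rfl
  set t : Nat := (8 * N - 7).toNat with htdef
  have ht : (t : Int) = 8 * N - 7 := Int.toNat_of_nonneg h8
  set s : Int := (Nat.sqrt t : Int) with hsdef
  have hl : s * s ≤ 8 * N - 7 := by
    calc s * s = ((Nat.sqrt t * Nat.sqrt t : ℕ) : Int) := by push_cast; ring
    _ ≤ (t : Int) := by exact_mod_cast Nat.sqrt_le t
    _ = 8 * N - 7 := ht
  have hu : 8 * N - 7 < (s + 1) * (s + 1) := by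
    calc 8 * N - 7 = (t : Int) := ht.symm
    _ < (((Nat.sqrt t + 1) * (Nat.sqrt t + 1) : ℕ) : Int) := by exact_mod_cast Nat.lt_succ_sqrt t
    _ = (s + 1) * (s + 1) := by push_cast; ring
  have hs0 : 0 ≤ s := by positivity
  have hs1 : 2 * d - 1 ≤ s := by nlinarith
  have hs2 : s ≤ 2 * d := by nlinarith
  have hdval : PySem.Int.floordiv (s + 1) 2 = d := by
    rw [PySem.Int.floordiv_eq_iff_of_pos (by norm_num)]; omega
  have hmval : PySem.Int.floordiv (d * (d - 1)) 2 = m := by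
    rw [PySem.Int.floordiv_eq_iff_of_pos (by norm_num)]; omega
  simp only [xy_alt, hsq, hdval, hmval]

-- Outer loop invariant: at the head of each iteration x = 1, y = j, result = T(j),
-- and N lies strictly beyond T(j) but within the diagonals the fuel still covers.
lemma loop_eval (f : Nat) : ∀ (j r N : Int), 1 ≤ j → 2 * r = j * (j + 1) → r < N →
    2 * N ≤ (j + f) * (j + f + 1) →
    [(xyLoop f 1 j r N).1, (xyLoop f 1 j r N).2] = xy_alt N := by
  induction f with
  | zero =>
    intro j r N _ hr hlt hub
    simp only [Nat.cast_zero, add_zero] at hub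
    omega
  | succ f ih =>
    intro j r N hj hr hlt hub
    simp only [xyLoop, if_neg (by omega : ¬ r = N)]
    by_cases h1 : r + 1 = N
    · rw [if_pos h1]
      have : xy_alt N = [N - r, (j + 1) - (N - r) + 1] :=
        alt_eval N (j + 1) r (by omega) (by ring_nf; linarith [hr]) hlt (by nlinarith)
      rw [this]
      simp only [List.cons.injEq]
      refine ⟨?_, ?_, ?_⟩ <;> first | trivial | omega
    · rw [if_neg h1]
      have hyt : ((j + 1 - 1).toNat : Int) = j := by omega
      by_cases h2 : N - (r + 1) ≤ j
      · -- break inside the inner loop: N is on diagonal j+1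
        rw [xyFor_break (j + 1 - 1).toNat 1 (j + 1) (r + 1) N (by omega) (by omega)]
        simp only [if_pos]
        have : xy_alt N = [N - r, (j + 1) - (N - r) + 1] :=
          alt_eval N (j + 1) r (by omega) (by ring_nf; linarith [hr]) hlt (by nlinarith)
        rw [this]
        simp only [List.cons.injEq]
        refine ⟨?_, ?_, ?_⟩ <;> first | trivial | omega
      · -- no break: move to the head of diagonal j+1
        rw [xyFor_nobreak (j + 1 - 1).toNat 1 (j + 1) (r + 1) N (by omega)]
        simp only [if_neg Bool.false_ne_true, hyt]
        have := ih (j + 1) (r + 1 + j) N (by omega) (by ring_nf; ring_nf at hr; omega)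
          (by omega) (by push_cast at hub ⊢; nlinarith)
        have he1 : 1 + j - j = (1 : Int) := by ring
        have he2 : j + 1 - j + j = j + 1 := by ring
        rw [he1, he2]
        exact this

-- ===== VERDICT (by name: the statement is the Claim_ definition above) =====
theorem xy_spec : Claim_equal_xy := by
  intro N _ hpre
  unfold Spec_xy xy
  by_cases h1 : N = 1
  · subst h1; decide
  · have hN : 2 ≤ N := by unfold Pre_xy at hpre; omega
    have hfuel : (N.toNat : Int) = N := Int.toNat_of_nonneg (by omega)
    exact loop_eval N.toNat 1 1 N (by omega) (by ring) (by omega) (by rw [hfuel]; nlinarith)
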